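-- pv_equiv track=rewrite | github.com/bstrage/Tarea4 | problema4.py | venganza
-- ===== SOURCE A (Python) =====
-- def venganza(orden_entrega, venganzas = 0, i = 0):
--     "Esta funcion sirve para realizar la venganza de aquellos tres primeros estudiantes que hayan sacado menor "
--     "a 60 puntos en el examen, se les asigna un 0"
--
--     if venganzas == 3: #si el marcador llega a tres venganzas se termina entonces, el resto de los alumnos ya no tendran cero
--                 return orden_entrega #auque hayan sacado menos de 60
--
--     if i >= len(orden_entrega): #tambien se impone que si se revisa la lista del orden de calificaciones termine la recursion
--         return orden_entrega #en el probable caso de que no hubiera mas alumnos, por ejemplo que solo dos alumnos sacaran menos de 60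
--
--     if orden_entrega[i] <= 59: #si la calificación es igual o menor a 59 se cambia por cero
--         orden_entrega[i] = 0
--         venganzas += 1 #finalmente se aumenta el contador de la venganza a 1 si se cumple
--
--     i += 1 #se aumenta el indice para pasar a revisar la siguiente calificacion
--
--     return venganza(orden_entrega, venganzas, i)
-- ===== SOURCE B (Python) =====
-- def venganza(orden_entrega, venganzas=0, i=0):
--     # Different decomposition: precompute the index sequence once with range()
--     # and count a remaining quota DOWN instead of counting venganzas UP.
--     # Mutates the list in place like A and returns the same list object.
--     quota = 3 - venganzas
--     for j in range(i, len(orden_entrega)):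
--         if quota == 0:
--             break
--         if orden_entrega[j] <= 59:
--             orden_entrega[j] = 0
--             quota -= 1
--     return orden_entrega
-- ===== Notes on version B (the rewrite author's own statement) =====
-- stated objective: idiomatic
-- what changed: Replaced the tail recursion carrying an upward venganzas counter by a for loop over a precomputed range(i, len) index sequence with a downward remaining-quota counter and an early break; same in-place mutation and return value.
-- outside the precondition, e.g. on venganza([10, 20], 0, -5): A raises IndexError, B raises IndexError
import Mathlib
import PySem

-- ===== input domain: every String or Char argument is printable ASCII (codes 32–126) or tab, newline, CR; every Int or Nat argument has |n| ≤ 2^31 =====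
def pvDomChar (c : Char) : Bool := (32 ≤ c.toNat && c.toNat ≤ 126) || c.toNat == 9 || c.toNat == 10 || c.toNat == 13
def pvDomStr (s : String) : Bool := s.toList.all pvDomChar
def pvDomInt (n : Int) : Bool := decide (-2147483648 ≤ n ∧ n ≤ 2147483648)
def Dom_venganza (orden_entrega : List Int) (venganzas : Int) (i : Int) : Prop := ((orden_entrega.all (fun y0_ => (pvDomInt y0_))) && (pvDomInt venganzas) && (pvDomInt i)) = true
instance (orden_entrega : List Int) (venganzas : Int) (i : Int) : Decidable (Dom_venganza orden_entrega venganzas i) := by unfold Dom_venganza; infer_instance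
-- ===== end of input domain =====

-- B replaces A's tail recursion (upward venganzas counter, index test each call) by a for loop over a
-- precomputed range(i, len) index list with a downward quota counter (idiomatic); both mutate the
-- argument list in place in Python — the equivalence proved here is about the return value.


-- ===== PORT A =====
-- Literal port of A's recursion: early return on venganzas == 3, early return on i >= len,
-- then conditional mutation + counter bump, then i += 1 and the tail call.
def venganza (orden_entrega : List Int) (venganzas : Int) (i : Int) : List Int :=
  if venganzas = 3 then orden_entrega
  else if (orden_entrega.length : Int) ≤ i then orden_entrega
  else
    match PySem.List.pyGet? orden_entrega i with
    | none => orden_entrega  -- IndexError in Python (i < -len); excluded by Pre_venganza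
    | some x =>
      if x ≤ 59 then
        venganza (PySem.List.pySetD orden_entrega i 0) (venganzas + 1) (i + 1)
      else
        venganza orden_entrega venganzas (i + 1)
termination_by (orden_entrega.length - i).toNat
decreasing_by
  · simp only [PySem.List.length_pySetD]; omega
  · omega

-- ===== PORT B =====
-- Port of Source B's for loop: structural recursion over the precomputed index list
-- range(i, len(orden_entrega)), state = (current list, remaining quota), break when quota == 0.
def venganzaFor (js : List Int) (acc : List Int) (quota : Int) : List Int :=
  match js with
  | [] => acc
  | j :: rest =>
    if quota = 0 then acc  -- break
    else
      match PySem.List.pyGet? acc j with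
      | none => acc  -- IndexError in Python (j < -len); excluded by Pre_venganza
      | some x =>
        if x ≤ 59 then venganzaFor rest (PySem.List.pySetD acc j 0) (quota - 1)
        else venganzaFor rest acc quota

def venganza_alt (orden_entrega : List Int) (venganzas : Int) (i : Int) : List Int :=
  venganzaFor (PySem.List.pyRange i (orden_entrega.length : Int) 1) orden_entrega (3 - venganzas)

-- ===== PRECONDITION & SPEC =====
-- Pre_ excludes exactly the inputs on which Python A raises IndexError: a first index below
-- -len(orden_entrega) that is still reached (venganzas ≠ 3 and i < len). B raises there too.
def Pre_venganza (orden_entrega : List Int) (venganzas : Int) (i : Int) : Prop :=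
  venganzas = 3 ∨ (orden_entrega.length : Int) ≤ i ∨ -(orden_entrega.length : Int) ≤ i
instance (orden_entrega : List Int) (venganzas : Int) (i : Int) : Decidable (Pre_venganza orden_entrega venganzas i) := by unfold Pre_venganza; infer_instance
def pvWitness_venganza : List Int × Int × Int := ([70, 50, 30, 90, 10, 20], 0, 0)

def Spec_venganza (orden_entrega : List Int) (venganzas : Int) (i : Int) (out : List Int) : Prop := out = venganza_alt orden_entrega venganzas i
instance (orden_entrega : List Int) (venganzas : Int) (i : Int) (out : List Int) : Decidable (Spec_venganza orden_entrega venganzas i out) := by unfold Spec_venganza; infer_instance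

-- ===== CLAIM (what is proved, stated in full; the proofs are below) =====
def Claim_equal_venganza : Prop := ∀ (orden_entrega : List Int) (venganzas : Int) (i : Int), Dom_venganza orden_entrega venganzas i → Pre_venganza orden_entrega venganzas i → Spec_venganza orden_entrega venganzas i (venganza orden_entrega venganzas i)

-- ===== LEMMAS AND PROOFS =====

theorem venganzaFor_zero (js acc : List Int) : venganzaFor js acc 0 = acc := by
  cases js <;> simp [venganzaFor]

-- The two ports agree on every input (both return the current list where Python raises).
theorem venganza_eq_alt (orden_entrega : List Int) (venganzas : Int) (i : Int) :
    venganza orden_entrega venganzas i =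
      venganzaFor (PySem.List.pyRange i (orden_entrega.length : Int) 1) orden_entrega (3 - venganzas) := by
  induction orden_entrega, venganzas, i using venganza.induct with
  | case1 o i =>
      rw [venganza]
      simp [venganzaFor_zero]
  | case2 o v i hv hlen =>
      rw [venganza, if_neg hv, if_pos hlen, PySem.List.pyRange_one_eq_nil hlen, venganzaFor]
  | case3 o v i hv hlen hget =>
      rw [venganza, if_neg hv, if_neg hlen,
          PySem.List.pyRange_one_cons (by omega), venganzaFor]
      rw [if_neg (by omega : ¬ (3 - v = 0))]
      simp only [hget]
  | case4 o v i hv hlen x hget hx ih =>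
      rw [venganza, if_neg hv, if_neg hlen,
          PySem.List.pyRange_one_cons (by omega), venganzaFor]
      rw [if_neg (by omega : ¬ (3 - v = 0))]
      simp only [hget, if_pos hx]
      rw [ih]
      simp only [PySem.List.length_pySetD]
      congr 1
      omega
  | case5 o v i hv hlen x hget hx ih =>
      rw [venganza, if_neg hv, if_neg hlen,
          PySem.List.pyRange_one_cons (by omega), venganzaFor]
      rw [if_neg (by omega : ¬ (3 - v = 0))]
      simp only [hget, if_neg hx]
      rw [ih]

-- ===== VERDICT (by name: the statement is the Claim_ definition above) =====
theorem venganza_spec : Claim_equal_venganza := by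
  intro o v i _ _
  unfold Spec_venganza venganza_alt
  exact venganza_eq_alt o v i
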